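-- pv_equiv track=rewrite | github.com/adridjs/thesis2020 | gebiotoolkit/corpus_alignment/align.py | find_parallel_sentences
-- ===== SOURCE A (Python) =====
-- def compare_sentences(lan_1, lan_2):
--     """
--     Given a list of sentences in
--     :param lan_1:
--     :param lan_2:
--     :return:
--     """
--     same_lan = [i[1] for i in lan_2]
--     update = []
--     for i, sentence in enumerate(lan_1):
--         if sentence[0] in same_lan:
--             lan_1[i].append(lan_2[same_lan.index(sentence[0])][2])
--             update.append(lan_1[i])
--     return update
--
-- def find_parallel_sentences(candidate_sentences):
--     """
--     Given a list of :param candidate_sentences: compare them and extract valid parallel sentences.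
--     :param candidate_sentences: Sentences that we want to check are valid parallel sentences.
--     :type candidate_sentences: list of tuple
--     :return: A list of parallel sentences, which is a subset of the given :param candidate_sentences
--     :rtype: list of tuple
--     """
--     try:
--         parallel_sentences = [[i[1]] for i in candidate_sentences[0]]
--         for sentence in candidate_sentences:
--             parallel_sentences = compare_sentences(parallel_sentences, sentence)
--     except:
--         parallel_sentences = []
--     return parallel_sentences
-- ===== SOURCE B (Python) =====
-- def find_parallel_sentences(candidate_sentences):
--     """Index-table reimplementation: one id->first-tuple dict per language, then a
--     single pass over candidate_sentences[0]."""
--     try: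
--         tables = []
--         for lang in candidate_sentences:
--             table = {}
--             for tup in lang:
--                 k = tup[1]
--                 if k not in table:
--                     table[k] = tup
--             tables.append(table)
--         results = []
--         for entry in candidate_sentences[0]:
--             key = entry[1]
--             row = [key]
--             ok = True
--             for table in tables:
--                 match = table.get(key)
--                 if match is None:
--                     ok = False
--                     break
--                 row.append(match[2])
--             if ok:
--                 results.append(row)
--         return results
--     except:
--         return []
-- ===== Notes on version B (the rewrite author's own statement) =====
-- stated objective: alternative
-- what changed: Replaces A's sequence of per-language filter-and-extend passes over a shrinking entry list (each pass doing an 'in same_lan' membership test plus a list.index scan per entry) with precomputed per-language dicts mapping id to its first tuple, followed by a single pass over candidate_sentences[0] that looks each key up in every table.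
import Mathlib
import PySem

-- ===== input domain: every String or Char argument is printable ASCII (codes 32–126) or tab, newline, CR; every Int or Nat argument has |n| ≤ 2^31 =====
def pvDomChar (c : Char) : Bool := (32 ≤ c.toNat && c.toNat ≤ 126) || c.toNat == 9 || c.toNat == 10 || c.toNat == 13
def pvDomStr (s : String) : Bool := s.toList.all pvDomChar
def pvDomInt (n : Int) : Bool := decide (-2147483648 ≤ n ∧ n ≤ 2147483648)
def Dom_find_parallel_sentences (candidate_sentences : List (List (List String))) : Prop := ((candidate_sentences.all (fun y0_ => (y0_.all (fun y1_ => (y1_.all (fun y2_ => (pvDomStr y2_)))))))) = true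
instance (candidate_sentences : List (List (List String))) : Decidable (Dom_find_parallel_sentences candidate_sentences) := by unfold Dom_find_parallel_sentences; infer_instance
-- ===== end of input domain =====

-- B replaces A's sequence of per-language filter-and-extend passes (each doing an 'in'
-- membership test and a list.index scan per entry) by per-language first-occurrence index
-- tables (dicts) plus a single pass over the first language's entries (objective: alternative
-- decomposition). A's try/except that returns [] on any error is modelled with Option.

-- ===== PORT A =====
-- same_lan = [i[1] for i in lan_2]
def pvSameLan : List (List String) → Option (List String)
  | [] => some []
  | i :: rest =>
    match PySem.List.pyGet? i 1 with
    | none => none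
    | some k => (pvSameLan rest).map (k :: ·)

-- the 'for i, sentence in enumerate(lan_1)' loop of compare_sentences (building update)
def pvCompareLoop (same_lan : List String) (lan2 : List (List String)) :
    List (List String) → Option (List (List String))
  | [] => some []
  | s :: rest =>
    match PySem.List.pyGet? s 0 with
    | none => none
    | some k =>
      if k ∈ same_lan then
        match PySem.List.index? same_lan k with
        | none => none   -- unreachable: guarded by the membership test (ValueError branch)
        | some idx =>
          match PySem.List.pyGet? lan2 (idx : Int) with
          | none => none
          | some m =>
            match PySem.List.pyGet? m 2 with
            | none => none
            | some v => (pvCompareLoop same_lan lan2 rest).map ((s ++ [v]) :: ·)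
      else pvCompareLoop same_lan lan2 rest

def pvCompareSentences (lan1 lan2 : List (List String)) : Option (List (List String)) :=
  match pvSameLan lan2 with
  | none => none
  | some sl => pvCompareLoop sl lan2 lan1

-- parallel_sentences = [[i[1]] for i in candidate_sentences[0]]
def pvInitA : List (List String) → Option (List (List String))
  | [] => some []
  | i :: rest =>
    match PySem.List.pyGet? i 1 with
    | none => none
    | some k => (pvInitA rest).map ([k] :: ·)

-- 'for sentence in candidate_sentences: parallel_sentences = compare_sentences(...)'
def pvMainLoopA : List (List (List String)) → List (List String) → Option (List (List String))
  | [], ps => some ps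
  | lang :: rest, ps =>
    match pvCompareSentences ps lang with
    | none => none
    | some ps' => pvMainLoopA rest ps'

def find_parallel_sentences (candidate_sentences : List (List (List String))) : List (List String) :=
  match PySem.List.pyGet? candidate_sentences 0 with
  | none => []
  | some first =>
    match pvInitA first with
    | none => []
    | some ps0 => (pvMainLoopA candidate_sentences ps0).getD []

-- ===== PORT B =====
-- inner 'for tup in lang' loop: first-occurrence table
def pvBuildTable : List (List String) → PySem.Dict String (List String) →
    Option (PySem.Dict String (List String))
  | [], tbl => some tbl
  | tup :: rest, tbl =>
    match PySem.List.pyGet? tup 1 with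
    | none => none
    | some k => pvBuildTable rest (if (tbl.get? k).isSome then tbl else tbl.insert k tup)

-- 'for lang in candidate_sentences: tables.append(...)'
def pvBuildTables : List (List (List String)) → Option (List (PySem.Dict String (List String)))
  | [] => some []
  | lang :: rest =>
    match pvBuildTable lang PySem.Dict.empty with
    | none => none
    | some t => (pvBuildTables rest).map (t :: ·)

-- inner 'for table in tables' loop with break; some none = entry dropped, none = exception
def pvWalkTables : List (PySem.Dict String (List String)) → String → List String →
    Option (Option (List String))
  | [], _, row => some (some row)
  | t :: ts, key, row =>
    match t.get? key with
    | none => some none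
    | some m =>
      match PySem.List.pyGet? m 2 with
      | none => none
      | some v => pvWalkTables ts key (row ++ [v])

-- 'for entry in candidate_sentences[0]' loop building results
def pvEntriesLoop (ts : List (PySem.Dict String (List String))) :
    List (List String) → Option (List (List String))
  | [] => some []
  | e :: rest =>
    match PySem.List.pyGet? e 1 with
    | none => none
    | some key =>
      match pvWalkTables ts key [key] with
      | none => none
      | some none => pvEntriesLoop ts rest
      | some (some row) => (pvEntriesLoop ts rest).map (row :: ·)

def find_parallel_sentences_alt (candidate_sentences : List (List (List String))) : List (List String) :=
  match pvBuildTables candidate_sentences with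
  | none => []
  | some ts =>
    match PySem.List.pyGet? candidate_sentences 0 with
    | none => []
    | some first => (pvEntriesLoop ts first).getD []

-- ===== PRECONDITION & SPEC =====
def Spec_find_parallel_sentences (candidate_sentences : List (List (List String))) (out : List (List String)) : Prop := out = find_parallel_sentences_alt candidate_sentences
instance (candidate_sentences : List (List (List String))) (out : List (List String)) : Decidable (Spec_find_parallel_sentences candidate_sentences out) := by unfold Spec_find_parallel_sentences; infer_instance

-- ===== CLAIM (what is proved, stated in full; the proofs are below) =====
def Claim_equal_find_parallel_sentences : Prop := ∀ (candidate_sentences : List (List (List String))), Dom_find_parallel_sentences candidate_sentences → Spec_find_parallel_sentences candidate_sentences (find_parallel_sentences candidate_sentences)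

-- ===== LEMMAS AND PROOFS =====

-- spec-level: first tuple of the language whose [1] equals k
def pvFirstMatch (k : String) : List (List String) → Option (List String)
  | [] => none
  | tup :: rest => if PySem.List.pyGet? tup 1 = some k then some tup else pvFirstMatch k rest

-- one-language spec step: filter/extend every entry through language L's first matches
def pvStepAll (t : PySem.Dict String (List String)) :
    List (List String) → Option (List (List String))
  | [] => some []
  | e :: rest =>
    match PySem.List.pyGet? e 0 with
    | none => none
    | some k =>
      match t.get? k with
      | none => pvStepAll t rest
      | some m =>
        match PySem.List.pyGet? m 2 with
        | none => none
        | some v => (pvStepAll t rest).map ((e ++ [v]) :: ·)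

-- walk every entry (nonempty, keyed by its head) through the tables
def pvWalkAll (ts : List (PySem.Dict String (List String))) :
    List (List String) → Option (List (List String))
  | [] => some []
  | e :: rest =>
    match PySem.List.pyGet? e 0 with
    | none => none
    | some k =>
      match pvWalkTables ts k e with
      | none => none
      | some none => pvWalkAll ts rest
      | some (some row) => (pvWalkAll ts rest).map (row :: ·)

theorem pvSameLan_isSome_iff (L : List (List String)) :
    (pvSameLan L).isSome ↔ ∀ tup ∈ L, (PySem.List.pyGet? tup 1).isSome := by
  induction L with
  | nil => simp [pvSameLan]
  | cons tup rest ih =>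
    cases h : PySem.List.pyGet? tup 1 with
    | none => simp [pvSameLan, h]
    | some k => simp [pvSameLan, h, ← ih]

theorem pvBuildTable_isSome_iff (L : List (List String)) (tbl : PySem.Dict String (List String)) :
    (pvBuildTable L tbl).isSome ↔ ∀ tup ∈ L, (PySem.List.pyGet? tup 1).isSome := by
  induction L generalizing tbl with
  | nil => simp [pvBuildTable]
  | cons tup rest ih =>
    cases h : PySem.List.pyGet? tup 1 with
    | none => simp [pvBuildTable, h]
    | some k => simp [pvBuildTable, h, ih]

theorem pvBuildTable_get? (L : List (List String)) (tbl t : PySem.Dict String (List String))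
    (h : pvBuildTable L tbl = some t) (k : String) :
    t.get? k = ((tbl.get? k).orElse (fun _ => pvFirstMatch k L)) := by
  induction L generalizing tbl with
  | nil =>
    simp only [pvBuildTable, Option.some.injEq] at h
    subst h
    cases tbl.get? k <;> simp [pvFirstMatch]
  | cons tup rest ih =>
    cases h1 : PySem.List.pyGet? tup 1 with
    | none => simp [pvBuildTable, h1] at h
    | some k0 =>
      simp only [pvBuildTable, h1] at h
      have hrec := ih _ h
      rw [hrec]
      by_cases hk : k = k0
      · subst hk
        simp only [pvFirstMatch, h1, if_pos trivial]
        cases htbl : tbl.get? k with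
        | none => simp [PySem.Dict.get?_insert_self]
        | some v =>
          simp [htbl]
      · have hfm : pvFirstMatch k (tup :: rest) = pvFirstMatch k rest := by
          simp only [pvFirstMatch]
          rw [if_neg]
          intro hc; rw [h1] at hc; exact hk (Option.some_injective _ hc).symm
        rw [hfm]
        cases htbl0 : (tbl.get? k0).isSome with
        | true => simp
        | false =>
          simp only [Bool.false_eq_true, if_false]
          rw [PySem.Dict.get?_insert_of_ne _ _ hk]

-- the A-side index lookup computes pvFirstMatch
theorem pvSameLan_lookup (L : List (List String)) (sl : List String)
    (h : pvSameLan L = some sl) (k : String) :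
    (k ∈ sl ↔ (pvFirstMatch k L).isSome) ∧
    (∀ i, PySem.List.index? sl k = some i → PySem.List.pyGet? L (i : Int) = pvFirstMatch k L) := by
  induction L generalizing sl with
  | nil =>
    simp only [pvSameLan, Option.some.injEq] at h
    cases h
    constructor
    · simp [pvFirstMatch]
    · intro i hi
      rw [PySem.List.index?_eq_idxOf?] at hi
      simp at hi
  | cons tup rest ih =>
    cases h1 : PySem.List.pyGet? tup 1 with
    | none => simp [pvSameLan, h1] at h
    | some k0 =>
      simp only [pvSameLan, h1, Option.map_eq_some_iff] at h
      obtain ⟨sl', hsl', rfl⟩ := h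
      obtain ⟨ihmem, ihidx⟩ := ih sl' hsl'
      by_cases hk : k = k0
      · subst hk
        constructor
        · simp [pvFirstMatch, h1]
        · intro i hi
          rw [PySem.List.index?_cons_self] at hi
          cases hi
          simp [pvFirstMatch, h1]
      · have hfm : pvFirstMatch k (tup :: rest) = pvFirstMatch k rest := by
          simp only [pvFirstMatch]
          rw [if_neg]
          intro hc; rw [h1] at hc; exact hk (Option.some_injective _ hc).symm
        constructor
        · rw [hfm, ← ihmem]
          simp [List.mem_cons, fun h => hk h]
        · intro i hi
          rw [PySem.List.index?_cons_of_ne] at hi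
          · simp only [Option.map_eq_some_iff] at hi
            obtain ⟨j, hj, rfl⟩ := hi
            rw [hfm, ← ihidx j hj]
            push_cast
            rw [PySem.List.pyGet?_cons_succ]
          · exact fun he => hk he.symm

-- the one-language A pass equals the table pass
theorem pvCompareLoop_eq_stepAll (L : List (List String)) (sl : List String)
    (t : PySem.Dict String (List String))
    (hsl : pvSameLan L = some sl) (ht : pvBuildTable L PySem.Dict.empty = some t)
    (es : List (List String)) :
    pvCompareLoop sl L es = pvStepAll t es := by
  induction es with
  | nil => rfl
  | cons e rest ih =>
    cases h0 : PySem.List.pyGet? e 0 with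
    | none => simp [pvCompareLoop, pvStepAll, h0]
    | some k =>
      have hget : t.get? k = pvFirstMatch k L := by
        rw [pvBuildTable_get? L _ _ ht k]
        simp [PySem.Dict.get?_empty]
      obtain ⟨hmem, hidx⟩ := pvSameLan_lookup L sl hsl k
      by_cases hk : k ∈ sl
      · have hsome : (PySem.List.index? sl k).isSome := by
          rw [PySem.List.index?_isSome_iff]; exact hk
        cases hi : PySem.List.index? sl k with
        | none => rw [hi] at hsome; simp at hsome
        | some i =>
          obtain ⟨m, hfm⟩ := Option.isSome_iff_exists.mp (hmem.mp hk)
          simp only [pvCompareLoop, pvStepAll, h0, if_pos hk, hi, hidx i hi, hget, hfm, ih]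
      · have hnone : pvFirstMatch k L = none := by
          cases hfm : pvFirstMatch k L with
          | none => rfl
          | some m => exact absurd (hmem.mpr (by simp [hfm])) hk
        simp only [pvCompareLoop, pvStepAll, h0, if_neg hk, hget, hnone, ih]

-- entries produced by a step are nonempty
theorem pvStepAll_ne_nil (t : PySem.Dict String (List String)) (es es' : List (List String))
    (h : pvStepAll t es = some es') (hne : ∀ e ∈ es, e ≠ []) : ∀ e ∈ es', e ≠ [] := by
  induction es generalizing es' with
  | nil => simp only [pvStepAll, Option.some.injEq] at h; cases h; simp
  | cons e rest ih =>
    have hrest : ∀ x ∈ rest, x ≠ [] := fun x hx => hne x (List.mem_cons_of_mem _ hx)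
    cases h0 : PySem.List.pyGet? e 0 with
    | none => simp [pvStepAll, h0] at h
    | some k =>
      cases hg : t.get? k with
      | none =>
        simp only [pvStepAll, h0, hg] at h
        exact ih es' h hrest
      | some m =>
        cases h2 : PySem.List.pyGet? m 2 with
        | none => simp [pvStepAll, h0, hg, h2] at h
        | some v =>
          simp only [pvStepAll, h0, hg, h2, Option.map_eq_some_iff] at h
          obtain ⟨es'', hes'', rfl⟩ := h
          intro x hx
          rcases List.mem_cons.mp hx with rfl | hx
          · simp
          · exact ih es'' hes'' hrest x hx

-- walking head-keyed entries through t :: ts = stepping through t, then walking ts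
theorem pvWalkAll_cons (t : PySem.Dict String (List String))
    (ts : List (PySem.Dict String (List String))) (es : List (List String))
    (hne : ∀ e ∈ es, e ≠ []) :
    pvWalkAll (t :: ts) es = (pvStepAll t es).bind (pvWalkAll ts) := by
  induction es with
  | nil => rfl
  | cons e rest ih =>
    have hrest : ∀ x ∈ rest, x ≠ [] := fun x hx => hne x (List.mem_cons_of_mem _ hx)
    have ih := ih hrest
    obtain ⟨k, e', rfl⟩ : ∃ k e', e = k :: e' := by
      cases e with
      | nil => exact absurd rfl (hne [] List.mem_cons_self)
      | cons a b => exact ⟨a, b, rfl⟩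
    have hhead : PySem.List.pyGet? (k :: e') 0 = some k := by simp
    cases hg : t.get? k with
    | none =>
      simp only [pvWalkAll, pvStepAll, pvWalkTables, hhead, hg, ih]
    | some m =>
      cases h2 : PySem.List.pyGet? m 2 with
      | none => simp [pvWalkAll, pvStepAll, pvWalkTables, hg, h2]
      | some v =>
        have hhead2 : PySem.List.pyGet? ((k :: e') ++ [v]) 0 = some k := by
          simp [PySem.List.pyGet?_zero_cons]
        cases hs : pvStepAll t rest with
        | none =>
          simp only [pvWalkAll, pvStepAll, pvWalkTables, hhead, hg, h2, hs, ih,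
            Option.map_none, Option.bind_none]
          cases hw : pvWalkTables ts k ((k :: e') ++ [v]) with
          | none => rfl
          | some r => cases r <;> rfl
        | some es'' =>
          simp only [pvWalkAll, pvStepAll, pvWalkTables, hhead, hg, h2, hs, ih,
            Option.map_some, Option.bind_some, hhead2]

-- A's language-major loop equals B's table-major walk (generalized invariant)
theorem pvMainLoopA_eq (ls : List (List (List String))) (es : List (List String))
    (hne : ∀ e ∈ es, e ≠ []) :
    pvMainLoopA ls es = (pvBuildTables ls).bind (fun ts => pvWalkAll ts es) := by
  induction ls generalizing es with
  | nil =>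
    simp only [pvMainLoopA, pvBuildTables, Option.bind_some]
    induction es with
    | nil => rfl
    | cons e rest ih =>
      have hrest : ∀ x ∈ rest, x ≠ [] := fun x hx => hne x (List.mem_cons_of_mem _ hx)
      obtain ⟨k, e', rfl⟩ : ∃ k e', e = k :: e' := by
        cases e with
        | nil => exact absurd rfl (hne [] List.mem_cons_self)
        | cons a b => exact ⟨a, b, rfl⟩
      simp [pvWalkAll, pvWalkTables, ← ih hrest]
  | cons L ls' ih =>
    cases hsl : pvSameLan L with
    | none =>
      have hbt : pvBuildTable L PySem.Dict.empty = none := by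
        cases hbt : pvBuildTable L PySem.Dict.empty with
        | none => rfl
        | some t =>
          have h1 : (pvBuildTable L PySem.Dict.empty).isSome := by simp [hbt]
          rw [pvBuildTable_isSome_iff] at h1
          have h2 := (pvSameLan_isSome_iff L).mpr h1
          rw [hsl] at h2; simp at h2
      simp [pvMainLoopA, pvBuildTables, pvCompareSentences, hsl, hbt]
    | some sl =>
      cases hbt : pvBuildTable L PySem.Dict.empty with
      | none =>
        have h1 : (pvSameLan L).isSome := by simp [hsl]
        rw [pvSameLan_isSome_iff] at h1
        have h2 := (pvBuildTable_isSome_iff L PySem.Dict.empty).mpr h1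
        rw [hbt] at h2; simp at h2
      | some t =>
        have hstep := pvCompareLoop_eq_stepAll L sl t hsl hbt es
        cases hs : pvStepAll t es with
        | none =>
          simp only [pvMainLoopA, pvBuildTables, pvCompareSentences, hsl, hbt, hstep, hs]
          cases hts : pvBuildTables ls' with
          | none => rfl
          | some ts =>
            simp only [Option.map_some, Option.bind_some]
            rw [pvWalkAll_cons t ts es hne, hs]
            rfl
        | some es' =>
          simp only [pvMainLoopA, pvBuildTables, pvCompareSentences, hsl, hbt, hstep, hs]
          rw [ih es' (pvStepAll_ne_nil t es es' hs hne)]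
          cases hts : pvBuildTables ls' with
          | none => rfl
          | some ts =>
            simp only [Option.map_some, Option.bind_some]
            rw [pvWalkAll_cons t ts es hne, hs]
            rfl

-- B's entries loop = A's init (extract all [1]s) then walk
theorem pvEntriesLoop_eq (ts : List (PySem.Dict String (List String))) (first : List (List String)) :
    pvEntriesLoop ts first = (pvInitA first).bind (pvWalkAll ts) := by
  induction first with
  | nil => rfl
  | cons e rest ih =>
    cases h1 : PySem.List.pyGet? e 1 with
    | none => simp [pvEntriesLoop, pvInitA, h1]
    | some k =>
      cases hi : pvInitA rest with
      | none =>
        simp only [pvEntriesLoop, pvInitA, h1, hi, ih, Option.map_none, Option.bind_none]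
        cases hw : pvWalkTables ts k [k] with
        | none => rfl
        | some r => cases r <;> rfl
      | some es =>
        simp only [pvEntriesLoop, pvInitA, h1, hi, ih, Option.map_some, Option.bind_some,
          pvWalkAll, PySem.List.pyGet?_zero_cons]

theorem pvInitA_isSome_iff (first : List (List String)) :
    (pvInitA first).isSome ↔ ∀ tup ∈ first, (PySem.List.pyGet? tup 1).isSome := by
  induction first with
  | nil => simp [pvInitA]
  | cons tup rest ih =>
    cases h : PySem.List.pyGet? tup 1 with
    | none => simp [pvInitA, h]
    | some k => simp [pvInitA, h, ← ih]

theorem pvInitA_ne_nil (first es : List (List String)) (h : pvInitA first = some es) :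
    ∀ e ∈ es, e ≠ [] := by
  induction first generalizing es with
  | nil => simp only [pvInitA, Option.some.injEq] at h; cases h; simp
  | cons tup rest ih =>
    cases h1 : PySem.List.pyGet? tup 1 with
    | none => simp [pvInitA, h1] at h
    | some k =>
      simp only [pvInitA, h1, Option.map_eq_some_iff] at h
      obtain ⟨es', hes', rfl⟩ := h
      intro x hx
      rcases List.mem_cons.mp hx with rfl | hx
      · simp
      · exact ih es' hes' x hx

-- ===== VERDICT (by name: the statement is the Claim_ definition above) =====
theorem find_parallel_sentences_spec : Claim_equal_find_parallel_sentences := by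
  intro cs _
  show find_parallel_sentences cs = find_parallel_sentences_alt cs
  unfold find_parallel_sentences find_parallel_sentences_alt
  cases cs with
  | nil => rfl
  | cons first rest =>
    cases hi : pvInitA first with
    | none =>
      have hbt : pvBuildTable first PySem.Dict.empty = none := by
        cases hbt : pvBuildTable first PySem.Dict.empty with
        | none => rfl
        | some t =>
          have h1 : (pvBuildTable first PySem.Dict.empty).isSome := by simp [hbt]
          rw [pvBuildTable_isSome_iff] at h1
          have h2 := (pvInitA_isSome_iff first).mpr h1
          rw [hi] at h2; simp at h2
      simp [pvBuildTables, hbt, hi]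
    | some es0 =>
      simp only [PySem.List.pyGet?_zero_cons, hi]
      rw [pvMainLoopA_eq (first :: rest) es0 (pvInitA_ne_nil first es0 hi)]
      cases hts : pvBuildTables (first :: rest) with
      | none => simp
      | some ts =>
        simp only [Option.bind_some]
        rw [pvEntriesLoop_eq ts first, hi]
        rfl
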